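-- pv_equiv track=rewrite | github.com/Xiaba2203/Programaci-n-avanza-da-UPCH-2025-2 | lab-progra-avanzada/DefPosibles/P1/Medios.py | contar_repetidos
-- ===== SOURCE A (Python) =====
-- def contar_repetidos(lista):  # define contar repetidos
--     conteo = {}  # diccionario conteo
--     for elemento in lista:  # recorre lista
--         if elemento in conteo:  # si existe
--             conteo[elemento] += 1  # incrementa
--         else:  # si no existe
--             conteo[elemento] = 1  # inicializa
--     repetidos = 0  # contador repetidos
--     for cantidad in conteo.values():  # recorre cantidades
--         if cantidad > 1:  # si repetido
--             repetidos += cantidad - 1  # suma repetidos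
--     return repetidos  # retorna repetidos
-- ===== SOURCE B (Python) =====
-- def contar_repetidos(lista):
--     # closed form: total elements minus distinct elements = number of extra copies
--     return len(lista) - len(set(lista))
-- ===== Notes on version B (the rewrite author's own statement) =====
-- stated objective: simpler
-- what changed: Replaces the dict-counting loop and the second pass over the counts by the closed form len(lista) - len(set(lista)), since summing (count-1) over buckets telescopes to total minus distinct.
import Mathlib
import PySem

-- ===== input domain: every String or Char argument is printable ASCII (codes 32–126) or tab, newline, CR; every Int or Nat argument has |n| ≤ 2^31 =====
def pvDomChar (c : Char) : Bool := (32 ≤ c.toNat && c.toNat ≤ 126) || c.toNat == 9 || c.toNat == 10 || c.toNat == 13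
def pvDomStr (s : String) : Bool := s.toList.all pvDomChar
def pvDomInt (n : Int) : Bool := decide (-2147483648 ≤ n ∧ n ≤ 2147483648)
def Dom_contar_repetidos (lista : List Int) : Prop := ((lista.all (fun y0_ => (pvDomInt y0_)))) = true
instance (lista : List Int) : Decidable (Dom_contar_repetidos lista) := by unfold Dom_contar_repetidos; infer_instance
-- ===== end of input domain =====

-- ===== PORT A =====
-- B computes the same value by the closed form length - distinct-count (return value only; no mutation).
def contar_repetidos (lista : List Int) : Int :=
  let conteo := lista.foldl
    (fun (conteo : PySem.Dict Int Int) (elemento : Int) =>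
      if conteo.contains elemento then
        conteo.insert elemento (conteo.getD elemento 0 + 1)
      else
        conteo.insert elemento 1)
    PySem.Dict.empty
  conteo.values.foldl
    (fun (repetidos : Int) (cantidad : Int) =>
      if cantidad > 1 then repetidos + (cantidad - 1) else repetidos)
    0

-- ===== PORT B =====
def contar_repetidos_alt (lista : List Int) : Int :=
  (lista.length : Int) - ((PySem.Set.ofList lista).length : Int)

-- ===== PRECONDITION & SPEC =====
def Spec_contar_repetidos (lista : List Int) (out : Int) : Prop := out = contar_repetidos_alt lista
instance (lista : List Int) (out : Int) : Decidable (Spec_contar_repetidos lista out) := by unfold Spec_contar_repetidos; infer_instance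

-- ===== CLAIM (what is proved, stated in full; the proofs are below) =====
def Claim_equal_contar_repetidos : Prop := ∀ (lista : List Int), Dom_contar_repetidos lista → Spec_contar_repetidos lista (contar_repetidos lista)

-- ===== LEMMAS AND PROOFS =====

-- A's two branches both insert getD+1 (getD is 0 on a missing key), so the build loop is the counter loop.
theorem contar_step_eq (d : PySem.Dict Int Int) (e : Int) :
    (if d.contains e then d.insert e (d.getD e 0 + 1) else d.insert e 1) =
      d.insert e (d.getD e 0 + 1) := by
  by_cases h : d.contains e = true
  · simp [h]
  · simp at h
    rw [PySem.Dict.getD_of_not_contains d (0 : Int) h]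
    simp [h]

-- A's second loop over values all ≥ 1 computes sum - length (generalized accumulator).
theorem values_loop_eq (vs : List Int) (a : Int) (h : ∀ c ∈ vs, 1 ≤ c) :
    vs.foldl (fun r c => if c > 1 then r + (c - 1) else r) a =
      a + vs.sum - vs.length := by
  induction vs generalizing a with
  | nil => simp
  | cons c vs ih =>
    have hc : 1 ≤ c := h c (by simp)
    have hrest : ∀ x ∈ vs, 1 ≤ x := fun x hx => h x (by simp [hx])
    by_cases hgt : c > 1
    · simp only [List.foldl_cons, if_pos hgt, ih _ hrest, List.sum_cons, List.length_cons]
      push_cast; ring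
    · have hc1 : c = 1 := le_antisymm (by omega) hc
      simp only [List.foldl_cons, ih _ hrest, List.sum_cons, List.length_cons, hc1]
      push_cast; ring

-- sum of counts over the distinct elements is the length of the list
theorem sum_counts (l : List Int) :
    ((PySem.Set.ofList l).map (fun k => (l.count k : Int))).sum = (l.length : Int) := by
  have hperm : (PySem.Set.ofList l).Perm l.dedup := by
    refine (List.perm_ext_iff_of_nodup (PySem.Set.nodup_ofList l) l.nodup_dedup).mpr ?_
    intro a
    simp [PySem.Set.mem_ofList, List.mem_dedup]
  have h2 : ((PySem.Set.ofList l).map (fun k => l.count k)).sum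
      = (l.dedup.map (fun k => l.count k)).sum :=
    (hperm.map _).sum_eq
  have h3 : (l.dedup.map (fun k => l.count k)).sum = l.length :=
    List.sum_map_count_dedup_eq_length l
  have : ((PySem.Set.ofList l).map (fun k => (l.count k : Int))).sum
      = (((PySem.Set.ofList l).map (fun k => l.count k)).sum : Int) := by
    induction (PySem.Set.ofList l : List Int) with
    | nil => simp
    | cons x xs ih => simp [ih]
  rw [this, h2, h3]

-- ===== VERDICT (by name: the statement is the Claim_ definition above) =====
theorem contar_repetidos_spec : Claim_equal_contar_repetidos := by
  intro lista _
  unfold Spec_contar_repetidos contar_repetidos contar_repetidos_alt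
  have hbuild : lista.foldl
      (fun (conteo : PySem.Dict Int Int) (elemento : Int) =>
        if conteo.contains elemento then
          conteo.insert elemento (conteo.getD elemento 0 + 1)
        else
          conteo.insert elemento 1)
      PySem.Dict.empty = PySem.Dict.counter lista := by
    rw [← PySem.Dict.foldl_insert_getD_add_one_eq_counter]
    exact PySem.List.foldl_congr_mem _ _ _ _ (fun d e he => contar_step_eq d e)
  simp only [hbuild]
  have hvals : (PySem.Dict.counter lista).values
      = (PySem.Set.ofList lista).map (fun k => (lista.count k : Int)) := by
    have := PySem.Dict.items_counter (xs := lista)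
    simp [PySem.Dict.values, this, List.map_map, Function.comp]
  rw [hvals]
  have hge : ∀ c ∈ (PySem.Set.ofList lista).map (fun k => (lista.count k : Int)), 1 ≤ c := by
    intro c hc
    simp only [List.mem_map] at hc
    obtain ⟨k, hk, rfl⟩ := hc
    have : k ∈ lista := (PySem.Set.mem_ofList _ _).mp hk
    have := List.count_pos_iff.mpr this
    omega
  rw [values_loop_eq _ 0 hge, sum_counts]
  simp
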